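-- pv_equiv track=rewrite | github.com/jms7446/hackerrank | baekjoon/old/p9576.py | solve
-- ===== SOURCE A (Python) =====
-- from heapq import heappop, heappush
--
-- def solve(N, people):
--     people = sorted(people, reverse=True)
--     standby = []
--     count = 0
--     for n in range(N):
--         while people and people[-1][0] == n:
--             heappush(standby, people.pop()[1])
--         while standby:
--             if heappop(standby) >= n:
--                 count += 1
--                 break
--     return count
-- ===== SOURCE B (Python) =====
-- def solve(N, people):
--     free = list(range(N))  # ascending free slots
--     count = 0
--     for a, b in sorted(people, key=lambda p: p[1]):
--         lo = max(a, 0)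
--         for i, s in enumerate(free):
--             if s > b:
--                 break
--             if s >= lo:
--                 free.pop(i)
--                 count += 1
--                 break
--     return count
-- ===== Notes on version B (the rewrite author's own statement) =====
-- stated objective: alternative
-- what changed: A scans slots 0..N-1 keeping a min-heap of deadlines of people whose interval has opened and pops stale entries lazily; B instead iterates over the people sorted by interval end and assigns each to the earliest remaining free slot in its interval clamped to [0,N-1], maintaining an ascending list of free slots.
-- intended difference: On inputs where some person has a negative start, N > 0 and at least one person has a servable interval (start <= end, end >= 0, start < N), A returns 0 because the negative-start entry sits at the tail of its descending-sorted queue and the enqueue loop never fires for anyone, whereas B seats people normally with the interval clamped to the slot range, which is the intended matching. — e.g. on solve(1, [(-1, 0), (0, 0)]): A returns 0, B returns 1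
import Mathlib
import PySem

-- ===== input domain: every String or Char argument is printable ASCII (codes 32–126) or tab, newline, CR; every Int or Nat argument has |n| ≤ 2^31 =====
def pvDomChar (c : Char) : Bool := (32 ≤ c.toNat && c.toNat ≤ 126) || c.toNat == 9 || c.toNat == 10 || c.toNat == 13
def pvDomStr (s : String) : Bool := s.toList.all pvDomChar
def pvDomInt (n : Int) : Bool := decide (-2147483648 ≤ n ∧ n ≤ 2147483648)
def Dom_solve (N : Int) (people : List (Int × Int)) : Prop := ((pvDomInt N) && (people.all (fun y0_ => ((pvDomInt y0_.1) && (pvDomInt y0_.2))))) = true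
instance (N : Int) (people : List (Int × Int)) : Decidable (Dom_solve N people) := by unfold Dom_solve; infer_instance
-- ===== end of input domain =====

-- B replaces A's slot-by-slot scan with a deadline-heap by a person-by-person greedy over people sorted by interval end, assigning each the earliest remaining free slot (alternative algorithm, similar cost).


-- ===== PORT A =====
-- while people and people[-1][0] == n: heappush(standby, people.pop()[1])
-- (heapq on ints ported as a min-first ordered list: push = ordered insert, pop = head = min)
def solveDrain (n : Int) (ppl : List (Int × Int)) (standby : List Int) :
    List (Int × Int) × List Int :=
  match h : ppl.getLast? with
  | none => (ppl, standby)
  | some p =>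
    if p.1 = n then
      solveDrain n ppl.dropLast (List.orderedInsert (· ≤ ·) p.2 standby)
    else (ppl, standby)
termination_by ppl.length
decreasing_by
  have hne : ppl ≠ [] := by intro hnil; rw [hnil] at h; simp at h
  simpa [List.length_dropLast] using Nat.sub_lt (List.length_pos_iff.mpr hne) one_pos

-- while standby: if heappop(standby) >= n: count += 1; break
def solvePop (n : Int) : List Int → (List Int × Bool)
  | [] => ([], false)
  | e :: s => if n ≤ e then (s, true) else solvePop n s

def solve (N : Int) (people : List (Int × Int)) : Int :=
  let ppl := PySem.List.sorted2 people (fun p => p.1) (fun p => p.2) (reverse := true)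
  let st := (PySem.List.pyRange 0 N 1).foldl
    (fun (st : List (Int × Int) × List Int × Int) n =>
      let d := solveDrain n st.1 st.2.1
      match solvePop n d.2 with
      | (standby, true) => (d.1, standby, st.2.2 + 1)
      | (standby, false) => (d.1, standby, st.2.2))
    (ppl, ([] : List Int), (0 : Int))
  st.2.2

-- ===== PORT B =====
-- inner 'for i, s in enumerate(free): …' — returns the free list with the taken slot removed, or none
def altScan (lo b : Int) : List Int → Option (List Int)
  | [] => none
  | s :: rest =>
    if b < s then none
    else if lo ≤ s then some rest
    else
      match altScan lo b rest with
      | some rest' => some (s :: rest')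
      | none => none

def solve_alt (N : Int) (people : List (Int × Int)) : Int :=
  let st := (PySem.List.sorted people (fun p => p.2) (reverse := false)).foldl
    (fun (st : List Int × Int) p =>
      match altScan (max p.1 0) p.2 st.1 with
      | some free' => (free', st.2 + 1)
      | none => st)
    (PySem.List.pyRange 0 N 1, (0 : Int))
  st.2

-- ===== PRECONDITION & SPEC =====
-- On inputs where some person has a negative start, N > 0 and at least one person has a servable
-- interval (start ≤ end, end ≥ 0, start < N), A returns 0 because the negative-start entry sits at
-- the tail of its descending-sorted queue and the enqueue loop never fires for anyone, whereas B
-- seats people normally with the interval clamped to the slot range, which is the intended matching.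
def D_solve (N : Int) (people : List (Int × Int)) : Prop :=
  (∃ p ∈ people, p.1 < 0) ∧ 0 < N ∧ ∃ q ∈ people, q.1 ≤ q.2 ∧ 0 ≤ q.2 ∧ q.1 < N
instance (N : Int) (people : List (Int × Int)) : Decidable (D_solve N people) := by
  unfold D_solve; infer_instance
def Spec_solve (N : Int) (people : List (Int × Int)) (out : Int) : Prop :=
  ¬ D_solve N people → out = solve_alt N people
instance (N : Int) (people : List (Int × Int)) (out : Int) : Decidable (Spec_solve N people out) := by unfold Spec_solve; infer_instance
def pvDiffWitness_solve : Int × (List (Int × Int)) := (1, [(-1, 0), (0, 0)])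
def pvDiffWitnessOut_solve : Int × Int := (0, 1)

-- ===== CLAIM (what is proved, stated in full; the proofs are below) =====
def Claim_unchanged_solve : Prop := ∀ (N : Int) (people : List (Int × Int)), Dom_solve N people → Spec_solve N people (solve N people)
def Claim_changed_solve : Prop := Dom_solve (pvDiffWitness_solve.1) (pvDiffWitness_solve.2) ∧ D_solve (pvDiffWitness_solve.1) (pvDiffWitness_solve.2) ∧ solve (pvDiffWitness_solve.1) (pvDiffWitness_solve.2) = pvDiffWitnessOut_solve.1 ∧ solve_alt (pvDiffWitness_solve.1) (pvDiffWitness_solve.2) = pvDiffWitnessOut_solve.2 ∧ pvDiffWitnessOut_solve.1 ≠ pvDiffWitnessOut_solve.2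
def Claim_exact_solve : Prop := ∀ (N : Int) (people : List (Int × Int)), Dom_solve N people → D_solve N people → solve N people ≠ solve_alt N people

-- ===== LEMMAS AND PROOFS =====

def Mm : List (Int × Int) → Finset Int → ℕ
  | [], _ => 0
  | p :: L, F =>
      max (Mm L F) (F.sup fun s => if p.1 ≤ s ∧ s ≤ p.2 then 1 + Mm L (F.erase s) else 0)

lemma Mm_nil (F : Finset Int) : Mm [] F = 0 := rfl

lemma Mm_cons (p : Int × Int) (L : List (Int × Int)) (F : Finset Int) :
    Mm (p :: L) F
      = max (Mm L F) (F.sup fun s => if p.1 ≤ s ∧ s ≤ p.2 then 1 + Mm L (F.erase s) else 0) := rfl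

lemma Mm_cons_le (p : Int × Int) (L : List (Int × Int)) (F : Finset Int) :
    Mm L F ≤ Mm (p :: L) F := le_max_left _ _

lemma one_add_sup_le (F : Finset Int) (f : Int → ℕ) (C : ℕ) (h1 : 1 ≤ C)
    (h : ∀ u ∈ F, 1 + f u ≤ C) : 1 + F.sup f ≤ C := by
  have : F.sup f ≤ C - 1 := Finset.sup_le (fun u hu => by have := h u hu; omega)
  omega

lemma le_sup_if (F : Finset Int) (g : Int → ℕ) (q : Int × Int) {u : Int} (hu : u ∈ F)
    (hfe : q.1 ≤ u ∧ u ≤ q.2) :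
    1 + g u ≤ F.sup fun v => if q.1 ≤ v ∧ v ≤ q.2 then 1 + g v else 0 := by
  have := Finset.le_sup (f := fun v => if q.1 ≤ v ∧ v ≤ q.2 then 1 + g v else 0) hu
  simpa [hfe.1, hfe.2] using this

lemma Mm_ge_one (L : List (Int × Int)) (F : Finset Int) (q : Int × Int) (s : Int)
    (hq : q ∈ L) (hs : s ∈ F) (h1 : q.1 ≤ s) (h2 : s ≤ q.2) : 1 ≤ Mm L F := by
  induction L with
  | nil => simp at hq
  | cons p L ih =>
    rw [Mm_cons]
    rcases List.mem_cons.mp hq with rfl | hq'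
    · refine le_max_of_le_right ?_
      have := le_sup_if F (fun v => Mm L (F.erase v)) q hs ⟨h1, h2⟩
      simp only [] at this
      omega
    · exact le_max_of_le_left (ih hq')

lemma Mm_le_one_add_erase (L : List (Int × Int)) :
    ∀ (F : Finset Int) (t : Int), Mm L F ≤ 1 + Mm L (F.erase t) := by
  induction L with
  | nil => intro F t; simp [Mm_nil]
  | cons p L ih =>
    intro F t
    rw [Mm_cons]
    apply max_le
    · have h1 := ih F t
      have h2 := Mm_cons_le p L (F.erase t)
      omega
    · apply Finset.sup_le
      intro u hu
      split_ifs with hfe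
      · by_cases hut : u = t
        · subst hut
          have h1 := Mm_cons_le p L (F.erase u)
          omega
        · have h1 := ih (F.erase u) t
          rw [Finset.erase_right_comm] at h1
          have hu' : u ∈ F.erase t := Finset.mem_erase.mpr ⟨hut, hu⟩
          have h2 : (1 + Mm L ((F.erase t).erase u)) ≤ Mm (p :: L) (F.erase t) := by
            rw [Mm_cons]
            refine le_max_of_le_right ?_
            have := Finset.le_sup (f := fun s => if p.1 ≤ s ∧ s ≤ p.2 then 1 + Mm L ((F.erase t).erase s) else 0) hu'
            simpa [hfe] using this
          omega
      · omega

lemma Mm_erase_of_not_feas (L : List (Int × Int)) :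
    ∀ (F : Finset Int) (t : Int), (∀ p ∈ L, ¬(p.1 ≤ t ∧ t ≤ p.2)) →
      Mm L F = Mm L (F.erase t) := by
  induction L with
  | nil => intro F t _; simp [Mm_nil]
  | cons p L ih =>
    intro F t h
    have hL : ∀ r ∈ L, ¬(r.1 ≤ t ∧ t ≤ r.2) := fun r hr => h r (List.mem_cons_of_mem _ hr)
    have hp := h p (List.mem_cons_self ..)
    rw [Mm_cons, Mm_cons]
    have hsup : (F.sup fun s => if p.1 ≤ s ∧ s ≤ p.2 then 1 + Mm L (F.erase s) else 0)
        = (F.erase t).sup fun s => if p.1 ≤ s ∧ s ≤ p.2 then 1 + Mm L ((F.erase t).erase s) else 0 := by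
      by_cases ht : t ∈ F
      · have hsplit : (F.sup fun s => if p.1 ≤ s ∧ s ≤ p.2 then 1 + Mm L (F.erase s) else 0)
            = (if p.1 ≤ t ∧ t ≤ p.2 then 1 + Mm L (F.erase t) else 0)
              ⊔ ((F.erase t).sup fun s => if p.1 ≤ s ∧ s ≤ p.2 then 1 + Mm L (F.erase s) else 0) := by
          conv_lhs => rw [← Finset.insert_erase ht, Finset.sup_insert]
          rw [Finset.insert_erase ht]
        rw [hsplit, if_neg hp, Nat.zero_max]
        apply Finset.sup_congr rfl
        intro s hs
        split_ifs with hfs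
        · rw [Finset.erase_right_comm, ih (F.erase s) t hL]
        all_goals rfl
      · rw [Finset.erase_eq_of_notMem ht]
    rw [hsup, ih F t hL]

lemma Mm_swap_slot (L : List (Int × Int)) :
    ∀ (F : Finset Int) (t s : Int), t ∈ F → s ∉ F →
      (∀ p ∈ L, p.1 ≤ t → t ≤ p.2 → p.1 ≤ s ∧ s ≤ p.2) →
      Mm L F ≤ Mm L (insert s (F.erase t)) := by
  induction L with
  | nil => intro F t s _ _ _; simp [Mm_nil]
  | cons q L ih =>
    intro F t s ht hs h
    have hL : ∀ p ∈ L, p.1 ≤ t → t ≤ p.2 → p.1 ≤ s ∧ s ≤ p.2 :=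
      fun p hp => h p (List.mem_cons_of_mem _ hp)
    rw [Mm_cons, Mm_cons]
    apply max_le
    · exact le_trans (ih F t s ht hs hL) (le_max_left _ _)
    · apply Finset.sup_le
      intro u hu
      split_ifs with hfe
      · by_cases hut : u = t
        · subst hut
          have hqs := h q (List.mem_cons_self ..) hfe.1 hfe.2
          have herase : (insert s (F.erase u)).erase s = F.erase u :=
            Finset.erase_insert (fun hc => hs (Finset.mem_of_mem_erase hc))
          have hle := le_sup_if (insert s (F.erase u))
            (fun v => Mm L ((insert s (F.erase u)).erase v)) q
            (Finset.mem_insert_self s _) hqs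
          simp only [] at hle
          rw [herase] at hle
          exact le_max_of_le_right hle
        · have h1 := ih (F.erase u) t s (Finset.mem_erase.mpr ⟨fun he => hut he.symm, ht⟩)
            (fun hc => hs (Finset.mem_of_mem_erase hc)) hL
          have hue : u ≠ s := fun he => hs (he ▸ hu)
          have heq : insert s ((F.erase u).erase t) = (insert s (F.erase t)).erase u := by
            rw [Finset.erase_right_comm, Finset.erase_insert_of_ne (fun he => hue he.symm)]
          rw [heq] at h1
          have hu' : u ∈ insert s (F.erase t) :=
            Finset.mem_insert_of_mem (Finset.mem_erase.mpr ⟨hut, hu⟩)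
          have hle := le_sup_if (insert s (F.erase t))
            (fun v => Mm L ((insert s (F.erase t)).erase v)) q hu' hfe
          simp only [] at hle
          refine le_max_of_le_right ?_
          omega
      · omega

lemma Mm_drop_person (p : Int × Int) (L : List (Int × Int)) (F : Finset Int)
    (h : ∀ s ∈ F, ¬(p.1 ≤ s ∧ s ≤ p.2)) : Mm (p :: L) F = Mm L F := by
  rw [Mm_cons]
  apply le_antisymm
  · apply max_le le_rfl
    apply Finset.sup_le
    intro u hu
    rw [if_neg (h u hu)]
    exact Nat.zero_le _
  · exact le_max_left _ _

lemma Mm_congr_head (p p' : Int × Int) (L : List (Int × Int)) (F : Finset Int)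
    (h : ∀ s ∈ F, (p.1 ≤ s ∧ s ≤ p.2) ↔ (p'.1 ≤ s ∧ s ≤ p'.2)) :
    Mm (p :: L) F = Mm (p' :: L) F := by
  rw [Mm_cons, Mm_cons]
  congr 1
  apply Finset.sup_congr rfl
  intro s hs
  rw [if_congr (h s hs) rfl rfl]

lemma Mm_swap_person_le (p q : Int × Int) (L : List (Int × Int)) (F : Finset Int) :
    Mm (p :: q :: L) F ≤ Mm (q :: p :: L) F := by
  rw [Mm_cons]
  apply max_le
  · -- Mm (q :: L) F ≤ Mm (q :: p :: L) F
    rw [Mm_cons q L F, Mm_cons q (p :: L) F]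
    apply max_le
    · exact le_trans (Mm_cons_le p L F) (le_max_left _ _)
    · apply Finset.sup_le
      intro u hu
      split_ifs with hfe
      · have hle := le_sup_if F (fun v => Mm (p :: L) (F.erase v)) q hu hfe
        simp only [] at hle
        have h2 := Mm_cons_le p L (F.erase u)
        refine le_max_of_le_right ?_
        omega
      · omega
  · apply Finset.sup_le
    intro u hu
    split_ifs with hfe
    · -- 1 + Mm (q :: L) (F.erase u) ≤ Mm (q :: p :: L) F
      rw [Mm_cons q L (F.erase u)]
      have hA : 1 + Mm L (F.erase u) ≤ Mm (q :: p :: L) F := by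
        rw [Mm_cons q (p :: L) F]
        refine le_trans ?_ (le_max_left _ _)
        rw [Mm_cons p L F]
        exact le_max_of_le_right (le_sup_if F (fun v => Mm L (F.erase v)) p hu hfe)
      have hB : 1 + ((F.erase u).sup fun v => if q.1 ≤ v ∧ v ≤ q.2 then 1 + Mm L ((F.erase u).erase v) else 0)
          ≤ Mm (q :: p :: L) F := by
        apply one_add_sup_le
        · omega
        · intro v hv
          split_ifs with hfq
          · have hvu : v ≠ u := (Finset.mem_erase.mp hv).1
            have hvF : v ∈ F := Finset.mem_of_mem_erase hv
            have huv : u ∈ F.erase v := Finset.mem_erase.mpr ⟨fun he => hvu he.symm, hu⟩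
            rw [Mm_cons q (p :: L) F]
            have h1 := le_sup_if F (fun w => Mm (p :: L) (F.erase w)) q hvF hfq
            simp only [] at h1
            have h2 : 1 + Mm L ((F.erase v).erase u) ≤ Mm (p :: L) (F.erase v) := by
              rw [Mm_cons p L (F.erase v)]
              exact le_max_of_le_right
                (le_sup_if (F.erase v) (fun w => Mm L ((F.erase v).erase w)) p huv hfe)
            rw [Finset.erase_right_comm (a := v) (b := u)] at h2
            refine le_max_of_le_right ?_
            omega
          · omega
      have hmax := max_add_add_left 1 (Mm L (F.erase u))
        ((F.erase u).sup fun v => if q.1 ≤ v ∧ v ≤ q.2 then 1 + Mm L ((F.erase u).erase v) else 0)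
      omega
    · omega

lemma Mm_swap_person (p q : Int × Int) (L : List (Int × Int)) (F : Finset Int) :
    Mm (p :: q :: L) F = Mm (q :: p :: L) F :=
  le_antisymm (Mm_swap_person_le p q L F) (Mm_swap_person_le q p L F)

lemma Mm_perm {L L' : List (Int × Int)} (h : L.Perm L') : ∀ F, Mm L F = Mm L' F := by
  induction h with
  | nil => intro F; rfl
  | cons x h ih =>
    intro F
    rw [Mm_cons, Mm_cons, ih F]
    congr 1
    apply Finset.sup_congr rfl
    intro s _
    split_ifs
    · rw [ih (F.erase s)]
    · rfl
  | swap x y l => intro F; exact Mm_swap_person y x l F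
  | trans h1 h2 ih1 ih2 => intro F; rw [ih1 F, ih2 F]

lemma Mm_empty (L : List (Int × Int)) : Mm L ∅ = 0 := by
  induction L with
  | nil => rfl
  | cons p L ih => rw [Mm_cons, ih]; simp

lemma Mm_person_step (p : Int × Int) (L : List (Int × Int)) (F : Finset Int) (s0 : Int)
    (hs0 : s0 ∈ F) (hf1 : p.1 ≤ s0) (hf2 : s0 ≤ p.2)
    (hmin : ∀ s ∈ F, p.1 ≤ s → s ≤ p.2 → s0 ≤ s)
    (hend : ∀ q ∈ L, p.2 ≤ q.2) :
    Mm (p :: L) F = 1 + Mm L (F.erase s0) := by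
  apply le_antisymm
  · rw [Mm_cons]
    apply max_le
    · exact Mm_le_one_add_erase L F s0
    · apply Finset.sup_le
      intro u hu
      split_ifs with hf
      · by_cases hus : u = s0
        · subst hus; exact le_rfl
        · have hmem : s0 ∈ F.erase u := Finset.mem_erase.mpr ⟨fun he => hus he.symm, hs0⟩
          have hnm : u ∉ F.erase u := Finset.notMem_erase u F
          have hsw := Mm_swap_slot L (F.erase u) s0 u hmem hnm
            (fun r hr h1 h2 => ⟨le_trans h1 (hmin u hu hf.1 hf.2),
              le_trans hf.2 (hend r hr)⟩)
          have heq : insert u ((F.erase u).erase s0) = F.erase s0 := by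
            rw [Finset.erase_right_comm,
              Finset.insert_erase (Finset.mem_erase.mpr ⟨hus, hu⟩)]
          rw [heq] at hsw
          omega
      · omega
  · rw [Mm_cons]
    refine le_max_of_le_right ?_
    have := le_sup_if F (fun v => Mm L (F.erase v)) p hs0 ⟨hf1, hf2⟩
    simpa using this

lemma Mm_slot_step (q : Int × Int) (P : List (Int × Int)) (F : Finset Int) (n : Int)
    (hfe1 : q.1 ≤ n) (hfe2 : n ≤ q.2)
    (hmin : ∀ r ∈ P, r.1 ≤ n → n ≤ r.2 → q.2 ≤ r.2)
    (hslots : ∀ s ∈ F, n ≤ s) (hn : n ∈ F) :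
    Mm (q :: P) F = 1 + Mm P (F.erase n) := by
  apply le_antisymm
  · rw [Mm_cons]
    apply max_le
    · exact Mm_le_one_add_erase P F n
    · apply Finset.sup_le
      intro u hu
      split_ifs with hf
      · by_cases hun : u = n
        · subst hun; exact le_rfl
        · have hmem : n ∈ F.erase u := Finset.mem_erase.mpr ⟨fun he => hun he.symm, hn⟩
          have hnm : u ∉ F.erase u := Finset.notMem_erase u F
          have hsw := Mm_swap_slot P (F.erase u) n u hmem hnm
            (fun r hr h1 h2 =>
              ⟨le_trans h1 (hslots u hu), le_trans (le_trans hf.2 (hmin r hr h1 h2)) le_rfl⟩)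
          have heq : insert u ((F.erase u).erase n) = F.erase n := by
            rw [Finset.erase_right_comm,
              Finset.insert_erase (Finset.mem_erase.mpr ⟨hun, hu⟩)]
          rw [heq] at hsw
          omega
      · omega
  · rw [Mm_cons]
    refine le_max_of_le_right ?_
    have := le_sup_if F (fun v => Mm P (F.erase v)) q hn ⟨hfe1, hfe2⟩
    simpa using this

lemma Mm_relabel (n : Int) (D : List (Int × Int)) (R : List (Int × Int)) :
    ∀ (F : Finset Int),
      (∀ d ∈ D, d.1 = n) → (∀ s ∈ F, n ≤ s) → 0 ≤ n →
      Mm (D.map (fun d => ((0 : Int), d.2)) ++ R) F = Mm (D ++ R) F := by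
  induction D with
  | nil => intro F _ _ _; rfl
  | cons d D ih =>
    intro F hd hF h0
    have hdn : d.1 = n := hd d (List.mem_cons_self ..)
    have hd' : ∀ x ∈ D, x.1 = n := fun x hx => hd x (List.mem_cons_of_mem _ hx)
    simp only [List.map_cons, List.cons_append]
    have hhead : Mm (((0 : Int), d.2) :: (D.map (fun d => ((0 : Int), d.2)) ++ R)) F
        = Mm (d :: (D.map (fun d => ((0 : Int), d.2)) ++ R)) F := by
      apply Mm_congr_head
      intro s hs
      have := hF s hs
      constructor
      · rintro ⟨_, h2⟩; exact ⟨by omega, h2⟩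
      · rintro ⟨_, h2⟩; exact ⟨by omega, h2⟩
    rw [hhead, Mm_cons, Mm_cons, ih F hd' hF h0]
    congr 1
    apply Finset.sup_congr rfl
    intro s hs
    split_ifs
    · rw [ih (F.erase s) hd' (fun v hv => hF v (Finset.mem_of_mem_erase hv)) h0]
    · rfl

lemma Mm_drop_list (n : Int) (D : List Int) (R : List (Int × Int)) (F : Finset Int)
    (hlt : ∀ e ∈ D, e < n) (hF : ∀ s ∈ F, n ≤ s) :
    Mm (D.map (fun e => ((0 : Int), e)) ++ R) F = Mm R F := by
  induction D with
  | nil => rfl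
  | cons e D ih =>
    have he : e < n := hlt e (List.mem_cons_self ..)
    simp only [List.map_cons, List.cons_append]
    rw [Mm_drop_person _ _ _ (fun s hs => by
      have := hF s hs
      rintro ⟨_, h2⟩
      omega)]
    exact ih (fun x hx => hlt x (List.mem_cons_of_mem _ hx))

lemma altScan_eq_none (lo b : Int) :
    ∀ l : List Int, (∀ s ∈ l, ¬(lo ≤ s ∧ s ≤ b)) → altScan lo b l = none := by
  intro l
  induction l with
  | nil => intro _; rfl
  | cons s rest ih =>
    intro h
    have hs := h s (List.mem_cons_self ..)
    rw [altScan]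
    split_ifs with h1 h2
    · rfl
    · exact absurd ⟨h2, by omega⟩ hs
    · rw [ih (fun x hx => h x (List.mem_cons_of_mem _ hx))]

lemma altScan_none_spec (lo b : Int) :
    ∀ l : List Int, l.Pairwise (· < ·) → altScan lo b l = none →
      ∀ s ∈ l, ¬(lo ≤ s ∧ s ≤ b) := by
  intro l
  induction l with
  | nil => intro _ _ s hs; simp at hs
  | cons s rest ih =>
    intro hpw hnone x hx
    rw [altScan] at hnone
    have hlt : ∀ y ∈ rest, s < y := fun y hy => (List.pairwise_cons.mp hpw).1 y hy
    split_ifs at hnone with h1 h2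
    · rcases List.mem_cons.mp hx with rfl | hx'
      · omega
      · have := hlt x hx'; omega
    · rcases List.mem_cons.mp hx with rfl | hx'
      · omega
      · revert hnone
        split
        · intro h; exact absurd h (by simp)
        · intro _
          exact ih (List.pairwise_cons.mp hpw).2 (by assumption) x hx'

lemma altScan_some_spec (lo b : Int) :
    ∀ (l : List Int) (free' : List Int), l.Pairwise (· < ·) → altScan lo b l = some free' →
      ∃ s0, s0 ∈ l ∧ lo ≤ s0 ∧ s0 ≤ b ∧ (∀ s ∈ l, lo ≤ s → s0 ≤ s) ∧ free' = l.erase s0 := by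
  intro l
  induction l with
  | nil => intro free' _ h; exact absurd h (by simp [altScan])
  | cons s rest ih =>
    intro free' hpw hsome
    have hlt : ∀ y ∈ rest, s < y := fun y hy => (List.pairwise_cons.mp hpw).1 y hy
    rw [altScan] at hsome
    split_ifs at hsome with h1 h2
    · -- lo ≤ s, found head
      refine ⟨s, List.mem_cons_self .., h2, by omega, ?_, ?_⟩
      · intro x hx _
        rcases List.mem_cons.mp hx with rfl | hx'
        · exact le_rfl
        · exact le_of_lt (hlt x hx')
      · have hfr : free' = rest := by injection hsome with h; exact h.symm
        rw [hfr]
        simp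
    · -- s < lo, recurse
      revert hsome
      split
      · next rest' heq =>
        intro hsome
        obtain ⟨s0, hmem, hlo, hb, hminr, herase⟩ := ih rest' (List.pairwise_cons.mp hpw).2 heq
        have hfree : free' = s :: rest' := by injection hsome with h; exact h.symm
        refine ⟨s0, List.mem_cons_of_mem _ hmem, hlo, hb, ?_, ?_⟩
        · intro x hx hxlo
          rcases List.mem_cons.mp hx with rfl | hx'
          · omega
          · exact hminr x hx' hxlo
        · have hs0s : s0 ≠ s := by
            intro he; rw [he] at hlo; omega
          rw [hfree, herase, List.erase_cons_tail (by simp [hs0s.symm])]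
      · intro h; exact absurd h (by simp)

lemma toFinset_erase_of_nodup (l : List Int) (a : Int) (h : l.Nodup) :
    (l.erase a).toFinset = l.toFinset.erase a := by
  apply Finset.ext
  intro x
  simp only [List.mem_toFinset, Finset.mem_erase]
  rw [List.Nodup.mem_erase_iff h]

lemma alt_loop (L : List (Int × Int)) :
    ∀ (free : List Int) (c : Int),
      free.Pairwise (· < ·) → (∀ s ∈ free, 0 ≤ s) →
      L.Pairwise (fun a b => a.2 ≤ b.2) →
      (L.foldl
        (fun (st : List Int × Int) p =>
          match altScan (max p.1 0) p.2 st.1 with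
          | some free' => (free', st.2 + 1)
          | none => st) (free, c)).2
        = c + (Mm L free.toFinset : Int) := by
  induction L with
  | nil => intro free c _ _ _; simp [Mm_nil]
  | cons p L ih =>
    intro free c hpw hnn hsorted
    have hend : ∀ q ∈ L, p.2 ≤ q.2 := (List.pairwise_cons.mp hsorted).1
    have htail : L.Pairwise (fun a b => a.2 ≤ b.2) := (List.pairwise_cons.mp hsorted).2
    rw [List.foldl_cons]
    cases hscan : altScan (max p.1 0) p.2 free with
    | none =>
      have hno := altScan_none_spec _ _ free hpw hscan
      have hdrop : Mm (p :: L) free.toFinset = Mm L free.toFinset := by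
        apply Mm_drop_person
        intro s hs
        have hsf : s ∈ free := List.mem_toFinset.mp hs
        have h0 := hnn s hsf
        have := hno s hsf
        rintro ⟨ha, hb⟩
        exact this ⟨by omega, hb⟩
      rw [ih free c hpw hnn htail, hdrop]
    | some free' =>
      obtain ⟨s0, hmem, hlo, hb, hminr, herase⟩ := altScan_some_spec _ _ free free' hpw hscan
      have hnd : free.Nodup := hpw.imp (fun {a b} hab => ne_of_lt hab)
      have hpw' : free'.Pairwise (· < ·) := by
        rw [herase]; exact hpw.sublist (List.erase_sublist ..)
      have hnn' : ∀ s ∈ free', 0 ≤ s := fun s hs =>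
        hnn s (List.mem_of_mem_erase (herase ▸ hs))
      have hstep : Mm (p :: L) free.toFinset = 1 + Mm L (free.toFinset.erase s0) := by
        apply Mm_person_step p L free.toFinset s0 (List.mem_toFinset.mpr hmem)
          (by omega) hb ?_ hend
        intro s hs h1 h2
        exact hminr s (List.mem_toFinset.mp hs) (by have := hnn s (List.mem_toFinset.mp hs); omega)
      rw [ih free' (c + 1) hpw' hnn' htail, hstep, herase,
        toFinset_erase_of_nodup free s0 hnd]
      push_cast
      ring

lemma pop_true (n : Int) :
    ∀ (S S' : List Int), S.Pairwise (· ≤ ·) → solvePop n S = (S', true) →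
      ∃ D e, S = D ++ e :: S' ∧ (∀ x ∈ D, x < n) ∧ n ≤ e := by
  intro S
  induction S with
  | nil => intro S' _ h; simp [solvePop] at h
  | cons e s ih =>
    intro S' hpw h
    rw [solvePop] at h
    split_ifs at h with hne
    · refine ⟨[], e, ?_, by simp, hne⟩
      simp at h
      simp [h]
    · obtain ⟨D, e', heq, hD, he'⟩ := ih S' (List.pairwise_cons.mp hpw).2 h
      exact ⟨e :: D, e', by simp [heq], by
        intro x hx
        rcases List.mem_cons.mp hx with rfl | hx'
        · omega
        · exact hD x hx', he'⟩

lemma pop_false (n : Int) :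
    ∀ (S S' : List Int), solvePop n S = (S', false) → S' = [] ∧ ∀ x ∈ S, x < n := by
  intro S
  induction S with
  | nil => intro S' h; simp [solvePop] at h; exact ⟨h, by simp⟩
  | cons e s ih =>
    intro S' h
    rw [solvePop] at h
    split_ifs at h with hne
    · simp at h
    · obtain ⟨h1, h2⟩ := ih S' h
      refine ⟨h1, ?_⟩
      intro x hx
      rcases List.mem_cons.mp hx with rfl | hx'
      · omega
      · exact h2 x hx'

lemma solveDrain_nil (n : Int) (S : List Int) : solveDrain n [] S = ([], S) := by
  rw [solveDrain]
  split
  · rfl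
  · next q heq => simp at heq

lemma solveDrain_concat (n : Int) (p : Int × Int) (Q' : List (Int × Int)) (S : List Int) :
    solveDrain n (Q' ++ [p]) S
      = if p.1 = n then solveDrain n Q' (List.orderedInsert (· ≤ ·) p.2 S)
        else (Q' ++ [p], S) := by
  rw [solveDrain]
  split
  · next heq => simp at heq
  · next q heq =>
    rw [List.getLast?_concat] at heq
    injection heq with heq
    subst heq
    rw [List.dropLast_concat]

lemma drain_spec (n : Int) :
    ∀ (Q : List (Int × Int)) (S : List Int),
      Q.Pairwise (fun a b => b.1 ≤ a.1) → (∀ q ∈ Q, n ≤ q.1) → S.Pairwise (· ≤ ·) →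
      ∃ D, Q.Perm (D ++ (solveDrain n Q S).1) ∧ (∀ d ∈ D, d.1 = n) ∧
        ((solveDrain n Q S).2).Perm (D.map (·.2) ++ S) ∧
        ((solveDrain n Q S).2).Pairwise (· ≤ ·) ∧
        ((solveDrain n Q S).1).Pairwise (fun a b => b.1 ≤ a.1) ∧
        (∀ q ∈ (solveDrain n Q S).1, n + 1 ≤ q.1) := by
  intro Q
  induction hlen : Q.length using Nat.strong_induction_on generalizing Q with
  | _ len ih =>
  intro S hpw hge hS
  rcases List.eq_nil_or_concat Q with rfl | ⟨Q', p, rfl⟩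
  · rw [solveDrain_nil]
    exact ⟨[], by simp, by simp, by simp [List.Perm.refl], hS, by simp, by simp⟩
  · rw [List.concat_eq_append] at *
    rw [solveDrain_concat]
    split_ifs with hpn
    · -- p.1 = n : recurse
      have hlen' : Q'.length < len := by
        subst hlen; simp
      have hpw' : Q'.Pairwise (fun a b => b.1 ≤ a.1) :=
        hpw.sublist (List.sublist_append_left _ _)
      have hge' : ∀ q ∈ Q', n ≤ q.1 := fun q hq => hge q (by simp [hq])
      have hS2 : (List.orderedInsert (· ≤ ·) p.2 S).Pairwise (· ≤ ·) :=
        List.Pairwise.orderedInsert p.2 S hS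
      obtain ⟨D', hQperm, hD', hSperm, hSpw, hQpw, hQge⟩ :=
        ih Q'.length hlen' Q' rfl (List.orderedInsert (· ≤ ·) p.2 S) hpw' hge' hS2
      set X := (solveDrain n Q' (List.orderedInsert (· ≤ ·) p.2 S)).1 with hX
      refine ⟨D' ++ [p], ?_, ?_, ?_, hSpw, hQpw, hQge⟩
      · have h1 : (Q' ++ [p]).Perm ((D' ++ X) ++ [p]) := hQperm.append_right _
        have h2 : ((D' ++ X) ++ [p]).Perm ((D' ++ [p]) ++ X) := by
          simp only [List.append_assoc]
          exact List.Perm.append_left D' List.perm_append_comm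
        exact h1.trans h2
      · intro d hd
        rcases List.mem_append.mp hd with hd' | hd'
        · exact hD' d hd'
        · simp at hd'; rw [hd']; exact hpn
      · have h3 : (D'.map (·.2) ++ List.orderedInsert (· ≤ ·) p.2 S).Perm
            (D'.map (·.2) ++ (p.2 :: S)) :=
          List.Perm.append_left _ (List.perm_orderedInsert _ _ _)
        have h4 : D'.map (·.2) ++ (p.2 :: S) = (D' ++ [p]).map (·.2) ++ S := by simp
        exact (hSperm.trans h3).trans (h4 ▸ List.Perm.refl _)
    · -- p.1 ≠ n : stop, and every start exceeds n
      have hplast : ∀ a ∈ Q', p.1 ≤ a.1 := by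
        intro a ha
        have := List.pairwise_append.mp hpw
        exact this.2.2 a ha p (by simp)
      have hp1 : n + 1 ≤ p.1 := by
        have := hge p (by simp); omega
      refine ⟨[], by simp [List.Perm.refl], by simp, by simp [List.Perm.refl], hS, hpw, ?_⟩
      intro q hq
      rcases List.mem_append.mp hq with hq' | hq'
      · have := hplast q hq'; omega
      · simp at hq'; rw [hq']; omega

lemma a_loop (k : Nat) :
    ∀ (n : Int) (Q : List (Int × Int)) (S : List Int) (c : Int),
      0 ≤ n → Q.Pairwise (fun a b => b.1 ≤ a.1) → (∀ q ∈ Q, n ≤ q.1) → S.Pairwise (· ≤ ·) →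
      ((PySem.List.pyRange n (n + k) 1).foldl
        (fun (st : List (Int × Int) × List Int × Int) m =>
          let d := solveDrain m st.1 st.2.1
          match solvePop m d.2 with
          | (standby, true) => (d.1, standby, st.2.2 + 1)
          | (standby, false) => (d.1, standby, st.2.2)) (Q, S, c)).2.2
        = c + (Mm (S.map (fun e => ((0 : Int), e)) ++ Q) (PySem.List.pyRange n (n + k) 1).toFinset : Int) := by
  induction k with
  | zero =>
    intro n Q S c _ _ _ _
    rw [show n + ((0 : Nat) : Int) = n by simp, PySem.List.pyRange_one_eq_nil le_rfl]
    simp [Mm_empty]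
  | succ k ih =>
    intro n Q S c h0 hpw hge hS
    have hlt : n < n + ((k + 1 : Nat) : Int) := by push_cast; omega
    rw [PySem.List.pyRange_one_cons hlt]
    rw [show n + ((k + 1 : Nat) : Int) = (n + 1) + (k : Int) by push_cast; ring]
    simp only [List.foldl_cons]
    -- the step at slot n
    obtain ⟨D, hQperm, hD, hSperm, hSpw, hQpw, hQge⟩ := drain_spec n Q S hpw hge hS
    set Q₁ := (solveDrain n Q S).1 with hQ₁
    set S₁ := (solveDrain n Q S).2 with hS₁
    set R := (PySem.List.pyRange (n + 1) ((n + 1) + (k : Int)) 1).toFinset with hR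
    have hnR : n ∉ R := by
      rw [hR]
      simp only [List.mem_toFinset, PySem.List.mem_pyRange_one]
      omega
    have hFge : ∀ s ∈ insert n R, n ≤ s := by
      intro s hs
      rcases Finset.mem_insert.mp hs with rfl | hs'
      · exact le_rfl
      · rw [hR] at hs'
        simp only [List.mem_toFinset, PySem.List.mem_pyRange_one] at hs'
        omega
    have herase : (insert n R).erase n = R := Finset.erase_insert hnR
    -- the person multiset before slot n, rearranged to drained form
    have hM1 : Mm (S.map (fun e => ((0 : Int), e)) ++ Q) (insert n R)
        = Mm (S₁.map (fun e => ((0 : Int), e)) ++ Q₁) (insert n R) := by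
      have p1 : (S.map (fun e => ((0 : Int), e)) ++ Q).Perm
          (S.map (fun e => ((0 : Int), e)) ++ (D ++ Q₁)) := List.Perm.append_left _ hQperm
      have p2 : (S.map (fun e => ((0 : Int), e)) ++ (D ++ Q₁)).Perm
          (D ++ (S.map (fun e => ((0 : Int), e)) ++ Q₁)) := by
        have h5 := (List.perm_append_comm
          (l₁ := S.map (fun e => ((0 : Int), e))) (l₂ := D)).append_right Q₁
        simpa [List.append_assoc] using h5
      have hrel := Mm_relabel n D (S.map (fun e => ((0 : Int), e)) ++ Q₁) (insert n R) hD hFge h0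
      have hmap : D.map (fun d => ((0 : Int), d.2)) ++ (S.map (fun e => ((0 : Int), e)) ++ Q₁)
          = (D.map (·.2) ++ S).map (fun e => ((0 : Int), e)) ++ Q₁ := by
        simp [List.map_map, Function.comp]
      have p3 : ((D.map (·.2) ++ S).map (fun e => ((0 : Int), e)) ++ Q₁).Perm
          (S₁.map (fun e => ((0 : Int), e)) ++ Q₁) :=
        ((hSperm.map (fun e => ((0 : Int), e))).symm).append_right Q₁
      rw [Mm_perm (p1.trans p2), ← hrel, hmap, Mm_perm p3]
    rcases hpop : solvePop n S₁ with ⟨S₂, found⟩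
    cases found
    · -- no standby person seats slot n
      obtain ⟨hS₂nil, hall⟩ := pop_false n S₁ S₂ hpop
      subst hS₂nil
      have hdrop : Mm (S₁.map (fun e => ((0 : Int), e)) ++ Q₁) (insert n R) = Mm Q₁ (insert n R) := by
        have := Mm_drop_list n S₁ Q₁ (insert n R) hall hFge
        simpa using this
      have hslot : Mm Q₁ (insert n R) = Mm Q₁ R := by
        rw [Mm_erase_of_not_feas Q₁ (insert n R) n
          (fun r hr => by have := hQge r hr; rintro ⟨h1, h2⟩; omega), herase]
      have hge' : ∀ q ∈ Q₁, n + 1 ≤ q.1 := hQge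
      have := ih (n + 1) Q₁ [] c (by omega) hQpw hge' (by simp)
      simp only [List.map_nil, List.nil_append] at this
      rw [this, List.toFinset_cons, hM1, hdrop, hslot]
    · -- the minimal adequate standby deadline seats slot n
      obtain ⟨P0, e, hSsplit, hP0, hne⟩ := pop_true n S₁ S₂ hSpw hpop
      have hS₂pw : S₂.Pairwise (· ≤ ·) := by
        refine List.Pairwise.sublist ?_ hSpw
        rw [hSsplit]
        exact ((List.sublist_cons_self e S₂).trans (List.sublist_append_right _ _))
      have hmapsplit : S₁.map (fun e => ((0 : Int), e)) ++ Q₁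
          = P0.map (fun e => ((0 : Int), e))
            ++ (((0 : Int), e) :: (S₂.map (fun e => ((0 : Int), e)) ++ Q₁)) := by
        rw [hSsplit]; simp
      have hmin : ∀ r ∈ S₂.map (fun e => ((0 : Int), e)) ++ Q₁,
          r.1 ≤ n → n ≤ r.2 → ((0 : Int), e).2 ≤ r.2 := by
        intro r hr' h1 h2
        rcases List.mem_append.mp hr' with hr2 | hr2
        · obtain ⟨e', he', rfl⟩ := List.mem_map.mp hr2
          have : e ≤ e' := by
            have hpw2 : (e :: S₂).Pairwise (· ≤ ·) :=
              List.Pairwise.sublist (by rw [hSsplit]; exact List.sublist_append_right _ _) hSpw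
            exact (List.pairwise_cons.mp hpw2).1 e' he'
          simpa using this
        · have := hQge r hr2; omega
      have hstep : Mm (((0 : Int), e) :: (S₂.map (fun e => ((0 : Int), e)) ++ Q₁)) (insert n R)
          = 1 + Mm (S₂.map (fun e => ((0 : Int), e)) ++ Q₁) ((insert n R).erase n) :=
        Mm_slot_step _ _ _ n h0 hne hmin hFge (Finset.mem_insert_self n R)
      have hdrop : Mm (S₁.map (fun e => ((0 : Int), e)) ++ Q₁) (insert n R)
          = Mm (((0 : Int), e) :: (S₂.map (fun e => ((0 : Int), e)) ++ Q₁)) (insert n R) := by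
        rw [hmapsplit]
        exact Mm_drop_list n P0 _ (insert n R) hP0 hFge
      have hge' : ∀ q ∈ Q₁, n + 1 ≤ q.1 := hQge
      have hrec := ih (n + 1) Q₁ S₂ (c + 1) (by omega) hQpw hge' hS₂pw
      rw [hrec, List.toFinset_cons, hM1, hdrop, hstep, herase]
      push_cast
      ring

lemma pairwise_insertBy (before : Int × Int → Int × Int → Bool)
    (htr : ∀ a b c, before b a = false → before c b = false → before c a = false)
    (hasym : ∀ a b, before a b = true → before b a = false)
    (x : Int × Int) :
    ∀ l : List (Int × Int), l.Pairwise (fun a b => before b a = false) →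
      (PySem.List.insertBy before x l).Pairwise (fun a b => before b a = false) := by
  intro l
  induction l with
  | nil => intro _; simp [PySem.List.insertBy]
  | cons y ys ih =>
    intro hpw
    rw [PySem.List.insertBy]
    split_ifs with hxy
    · -- x :: y :: ys
      refine List.pairwise_cons.mpr ⟨?_, hpw⟩
      intro z hz
      rcases List.mem_cons.mp hz with rfl | hz'
      · exact hasym x z hxy
      · have hyz : before z y = false := (List.pairwise_cons.mp hpw).1 z hz'
        exact htr x y z (hasym x y hxy) hyz
    · -- y :: insertBy x ys
      refine List.pairwise_cons.mpr ⟨?_, ih (List.pairwise_cons.mp hpw).2⟩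
      intro z hz
      rcases (PySem.List.mem_insertBy before x z ys).mp hz with rfl | hz'
      · exact Bool.eq_false_iff.mpr (fun hc => hxy (by simp [hc]))
      · exact (List.pairwise_cons.mp hpw).1 z hz'

lemma sorted2_rev_pairwise_fst (xs : List (Int × Int)) :
    (PySem.List.sorted2 xs (fun p => p.1) (fun p => p.2) true).Pairwise
      (fun a b => b.1 ≤ a.1) := by
  have hmain : (PySem.List.sorted2 xs (fun p => p.1) (fun p => p.2) true).Pairwise
      (fun a b : Int × Int =>
        (fun u v : Int × Int =>
          decide (v.1 < u.1) || (!decide (u.1 < v.1) && decide (v.2 < u.2))) b a = false) := by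
    simp only [PySem.List.sorted2]
    generalize hacc : ([] : List (Int × Int)) = acc
    have hacc' : acc.Pairwise (fun a b : Int × Int =>
        (fun u v : Int × Int =>
          decide (v.1 < u.1) || (!decide (u.1 < v.1) && decide (v.2 < u.2))) b a = false) := by
      rw [← hacc]; simp
    clear hacc
    induction xs generalizing acc with
    | nil => simpa using hacc'
    | cons x xs ih =>
      rw [List.foldl_cons]
      apply ih
      apply pairwise_insertBy
      · intro a b c h1 h2
        simp only [Bool.or_eq_false_iff, Bool.and_eq_false_iff, Bool.not_eq_false',
          decide_eq_false_iff_not, decide_eq_true_eq, not_lt] at h1 h2 ⊢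
        constructor
        · omega
        · rcases h1.2 with h | h <;> rcases h2.2 with h' | h'
          · left; omega
          · by_cases hab : c.1 < a.1
            · left; simpa using hab
            · right; omega
          · by_cases hab : c.1 < a.1
            · left; simpa using hab
            · right; omega
          · by_cases hab : c.1 < a.1
            · left; simpa using hab
            · right; omega
      · intro a b h
        simp only [Bool.or_eq_true, Bool.and_eq_true, Bool.not_eq_true',
          decide_eq_true_eq, decide_eq_false_iff_not, not_lt] at h
        simp only [Bool.or_eq_false_iff, Bool.and_eq_false_iff, Bool.not_eq_false',
          decide_eq_false_iff_not, decide_eq_true_eq, not_lt]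
        rcases h with h | ⟨h1, h2⟩
        · exact ⟨by omega, Or.inl (by omega)⟩
        · exact ⟨by omega, Or.inr (by omega)⟩
      · exact hacc'
  apply hmain.imp
  intro a b h
  simp only [Bool.or_eq_false_iff, decide_eq_false_iff_not, not_lt] at h
  exact h.1

lemma blocked_fold (l : List Int) :
    ∀ (Q : List (Int × Int)) (c : Int), (∀ m ∈ l, 0 ≤ m) →
      (∀ h : Q ≠ [], (Q.getLast h).1 < 0) →
      (l.foldl
        (fun (st : List (Int × Int) × List Int × Int) m =>
          let d := solveDrain m st.1 st.2.1
          match solvePop m d.2 with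
          | (standby, true) => (d.1, standby, st.2.2 + 1)
          | (standby, false) => (d.1, standby, st.2.2)) (Q, [], c)).2.2 = c := by
  induction l with
  | nil => intro Q c _ _; rfl
  | cons m l ih =>
    intro Q c hm hQ
    simp only [List.foldl_cons]
    have hstep : solveDrain m Q [] = (Q, []) := by
      rcases List.eq_nil_or_concat Q with rfl | ⟨Q', p, rfl⟩
      · exact solveDrain_nil m []
      · rw [List.concat_eq_append] at *
        rw [solveDrain_concat]
        have hlast : (Q' ++ [p]).getLast (by simp) = p := List.getLast_concat ..
        have hp : p.1 < 0 := by
          have := hQ (by simp)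
          rwa [hlast] at this
        have hm0 : 0 ≤ m := hm m (List.mem_cons_self ..)
        rw [if_neg (by omega)]
    rw [hstep]
    have hpop : solvePop m ([] : List Int) = ([], false) := rfl
    rw [hpop]
    exact ih Q c (fun x hx => hm x (List.mem_cons_of_mem _ hx)) hQ

lemma alt_const (L : List (Int × Int)) :
    ∀ (free : List Int) (c : Int), (∀ p ∈ L, ∀ s ∈ free, ¬(max p.1 0 ≤ s ∧ s ≤ p.2)) →
      (L.foldl
        (fun (st : List Int × Int) p =>
          match altScan (max p.1 0) p.2 st.1 with
          | some free' => (free', st.2 + 1)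
          | none => st) (free, c)).2 = c := by
  induction L with
  | nil => intro free c _; rfl
  | cons p L ih =>
    intro free c h
    simp only [List.foldl_cons]
    rw [altScan_eq_none _ _ free (h p (List.mem_cons_self ..))]
    exact ih free c (fun q hq => h q (List.mem_cons_of_mem _ hq))

lemma pyRange_toNat (N : Int) :
    PySem.List.pyRange 0 N 1 = PySem.List.pyRange 0 (0 + (N.toNat : Int)) 1 := by
  by_cases h : 0 ≤ N
  · rw [Int.toNat_of_nonneg h]; norm_num
  · rw [PySem.List.pyRange_one_eq_nil (by omega), PySem.List.pyRange_one_eq_nil (by omega)]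

lemma pairwise_getLast (Q : List (Int × Int)) (h : Q ≠ [])
    (hpw : Q.Pairwise (fun a b => b.1 ≤ a.1)) :
    ∀ x ∈ Q, (Q.getLast h).1 ≤ x.1 := by
  intro x hx
  have hsplit : Q.dropLast ++ [Q.getLast h] = Q := List.dropLast_append_getLast h
  rw [← hsplit] at hx hpw
  rcases List.mem_append.mp hx with hx' | hx'
  · exact (List.pairwise_append.mp hpw).2.2 x hx' _ (by simp)
  · simp at hx'; rw [hx']

lemma solve_blocked (N : Int) (people : List (Int × Int))
    (hneg : ∃ p ∈ people, p.1 < 0) : solve N people = 0 := by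
  simp only [solve]
  apply blocked_fold
  · intro m hm; exact (PySem.List.mem_pyRange_one.mp hm).1
  · intro hne
    obtain ⟨p, hp, hplt⟩ := hneg
    have hp' : p ∈ PySem.List.sorted2 people (fun p => p.1) (fun p => p.2) true :=
      ((PySem.List.sorted2_perm people _ _ true).mem_iff).mpr hp
    have := pairwise_getLast _ hne (sorted2_rev_pairwise_fst people) p hp'
    omega

lemma alt_eq_Mm (N : Int) (people : List (Int × Int)) :
    solve_alt N people
      = (Mm (PySem.List.sorted people (fun p => p.2) false)
          (PySem.List.pyRange 0 (0 + (N.toNat : Int)) 1).toFinset : Int) := by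
  have hB := alt_loop (PySem.List.sorted people (fun p => p.2) false)
    (PySem.List.pyRange 0 (0 + (N.toNat : Int)) 1) 0
    (PySem.List.pairwise_lt_pyRange_one _ _)
    (fun s hs => (PySem.List.mem_pyRange_one.mp hs).1)
    (PySem.List.sorted_pairwise people (fun p => p.2))
  simp only [solve_alt]
  rw [pyRange_toNat N, hB]
  ring

theorem solve_eq (N : Int) (people : List (Int × Int)) (hnd : ¬ D_solve N people) :
    solve N people = solve_alt N people := by
  by_cases hneg : ∃ p ∈ people, p.1 < 0
  · by_cases hN : 0 < N
    · have hfeas : ¬∃ q ∈ people, q.1 ≤ q.2 ∧ 0 ≤ q.2 ∧ q.1 < N := by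
        intro hq; exact hnd ⟨hneg, hN, hq⟩
      have hA : solve N people = 0 := solve_blocked N people hneg
      have hB : solve_alt N people = 0 := by
        simp only [solve_alt]
        apply alt_const
        intro p hp s hs
        rintro ⟨h1, h2⟩
        have hp' : p ∈ people := (PySem.List.mem_sorted people (fun p => p.2) false p).mp hp
        have hsr := PySem.List.mem_pyRange_one.mp hs
        exact hfeas ⟨p, hp', by omega, by omega, by omega⟩
      rw [hA, hB]
    · have hNle : N ≤ 0 := by omega
      simp only [solve, solve_alt, PySem.List.pyRange_one_eq_nil hNle, List.foldl_nil]
      rw [alt_const _ _ _ (fun p _ s hs => by simp at hs)]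
  · push Not at hneg
    have hstarts : ∀ q ∈ PySem.List.sorted2 people (fun p => p.1) (fun p => p.2) true, 0 ≤ q.1 :=
      fun q hq => hneg q (((PySem.List.sorted2_perm people _ _ true).mem_iff).mp hq)
    have hA := a_loop N.toNat 0
      (PySem.List.sorted2 people (fun p => p.1) (fun p => p.2) true) [] 0 le_rfl
      (sorted2_rev_pairwise_fst people) hstarts (by simp)
    simp only [List.map_nil, List.nil_append] at hA
    simp only [solve]
    rw [pyRange_toNat N, hA, alt_eq_Mm N people]
    rw [Mm_perm (PySem.List.sorted2_perm people (fun p => p.1) (fun p => p.2) true),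
      Mm_perm (PySem.List.sorted_perm people (fun p => p.2) false)]
    ring

-- ===== VERDICT (by name: the statement is the Claim_ definition above) =====
theorem solve_spec : Claim_unchanged_solve := by
  intro N people _ hnd
  exact solve_eq N people hnd

theorem solve_changed : Claim_changed_solve := by
  unfold Claim_changed_solve
  refine ⟨by decide, by decide, ?_, by decide, by decide⟩
  exact solve_blocked 1 [(-1, 0), (0, 0)] ⟨(-1, 0), by simp, by decide⟩

theorem solve_tight : Claim_exact_solve := by
  intro N people _ hd
  obtain ⟨hneg, hN, q, hq, h12, h2, h1N⟩ := hd
  have hA : solve N people = 0 := solve_blocked N people hneg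
  have hB : 1 ≤ solve_alt N people := by
    rw [alt_eq_Mm N people]
    have hqs : q ∈ PySem.List.sorted people (fun p => p.2) false :=
      (PySem.List.mem_sorted people (fun p => p.2) false q).mpr hq
    have hsmem : max q.1 0 ∈ (PySem.List.pyRange 0 (0 + (N.toNat : Int)) 1).toFinset := by
      rw [List.mem_toFinset, PySem.List.mem_pyRange_one]
      omega
    have := Mm_ge_one _ _ q (max q.1 0) hqs hsmem (by omega) (by omega)
    omega
  omega
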